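-- pv_equiv track=rewrite | github.com/NielsRogge/Description2Process | description2process/clause_extraction.py | remove_double_subsents
-- ===== SOURCE A (Python) =====
-- def string_diff(string1, string2) :
--     return string1.replace(string2,"")
--
-- def isSubstring(sub,sent) :
--     return sent.lower().replace(' ','').find(sub.lower().replace(' ','')) >= 0
--
-- def remove_double_subsents(subs) :
--     temp = []
--     final = []
--     # check all subsentences is list except first one, first is already compared with second
--     while len(subs) > 0:
--         sub_last = subs[-1] # take last subsentence
--         # compare with all subsentences except last one
--         for sub2 in subs[0:-1] :
--             if isSubstring(sub_last,sub2) : # check if last substring appears in other substring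
--                 temp.append(string_diff(sub2,sub_last)) # yes: append substring with last string removed
--             else :
--                 temp.append(sub2) # no: append substring
--         final.insert(0,sub_last.strip()) # insert last string because it is checked now
--         subs = temp # reprocess but with already shorter subs now
--         temp = []
--
--     return final
-- ===== SOURCE B (Python) =====
-- def string_diff(string1, string2) :
--     return string1.replace(string2,"")
--
-- def isSubstring(sub,sent) :
--     return sent.lower().replace(' ','').find(sub.lower().replace(' ','')) >= 0
--
-- def remove_double_subsents(subs) :
--     # Deferred application: never rewrite pending elements. Walk the input from
--     # the end, keep the fully-reduced values already emitted (mods, in emission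
--     # order); when an element is reached, replay that modifier sequence on it
--     # once. This is equivalent because in A an element at position j, by the
--     # time it becomes the last element, has been reduced by exactly the final
--     # values of positions n-1, n-2, ..., j+1 in that order.
--     mods = []
--     out = []
--     for x in reversed(subs):
--         for m in mods:
--             if isSubstring(m, x):
--                 x = string_diff(x, m)
--         mods.append(x)
--         out.append(x.strip())
--     out.reverse()
--     return out
-- ===== Notes on version B (the rewrite author's own statement) =====
-- stated objective: alternative
-- what changed: A eagerly rewrites the whole remaining list on every pass (rebuild temp, reassign subs); B never touches pending elements: it folds over the reversed input keeping only the list of already-emitted reduced values and replays that modifier sequence on each element once when it is reached (lazy/deferred application instead of eager list rewriting).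
import Mathlib
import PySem

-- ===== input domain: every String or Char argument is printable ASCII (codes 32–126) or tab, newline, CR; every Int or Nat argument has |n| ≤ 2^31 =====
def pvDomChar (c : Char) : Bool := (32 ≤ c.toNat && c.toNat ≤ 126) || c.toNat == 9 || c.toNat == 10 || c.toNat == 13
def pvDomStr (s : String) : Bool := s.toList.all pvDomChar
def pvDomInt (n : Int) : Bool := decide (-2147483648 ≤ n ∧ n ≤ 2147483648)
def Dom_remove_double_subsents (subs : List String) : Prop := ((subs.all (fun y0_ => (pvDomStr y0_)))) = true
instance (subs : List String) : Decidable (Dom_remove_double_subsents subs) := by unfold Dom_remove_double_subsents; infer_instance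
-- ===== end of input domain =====

-- B replaces A's eager per-pass rewrite of the whole remaining list by a deferred-application
-- fold over the reversed input: it keeps only the already-emitted reduced values and replays
-- them on each element once when it is reached (objective: alternative, same asymptotic cost).

-- ===== PORT A =====
def pyStringDiff (string1 string2 : String) : String := PySem.Str.replace string1 string2 ""

def pyIsSubstring (sub sent : String) : Bool :=
  decide (0 ≤ PySem.Str.find (PySem.Str.replace (PySem.Str.lower sent) " " "")
            (PySem.Str.replace (PySem.Str.lower sub) " " ""))

-- `gmod last` is what one pass of A does to one earlier element (used by the termination proof)
def gmod (last x : String) : String := if pyIsSubstring last x then pyStringDiff x last else x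

theorem foldl_tempA (last : String) (l t : List String) :
    l.foldl (fun t sub2 => if pyIsSubstring last sub2 then t ++ [pyStringDiff sub2 last] else t ++ [sub2]) t
      = t ++ l.map (gmod last) := by
  induction l generalizing t with
  | nil => simp
  | cons x xs ih =>
      simp only [List.foldl_cons, List.map_cons, gmod]
      split_ifs <;> simp [ih]

def remove_double_subsents_loop (subs final : List String) : List String :=
  if _h : subs.length > 0 then
    -- subs[-1]: exact, subs is nonempty here
    let sub_last := PySem.List.pyGetD subs (-1) ""
    let temp := (PySem.List.slice subs (some 0) (some (-1))).foldl
      (fun t sub2 => if pyIsSubstring sub_last sub2 then t ++ [pyStringDiff sub2 sub_last] else t ++ [sub2]) []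
    remove_double_subsents_loop temp (PySem.List.insert final 0 (PySem.Str.strip sub_last))
  else final
termination_by subs.length
decreasing_by
  simp only [dite_eq_ite, foldl_tempA, PySem.List.slice_zero_start, PySem.List.slice_to_neg_one,
    List.nil_append, List.length_map, List.length_dropLast]
  omega

def remove_double_subsents (subs : List String) : List String :=
  remove_double_subsents_loop subs []

-- ===== PORT B =====
-- the inner `for m in mods: if …: x = string_diff(x, m)` loop of Source B
def applyMods (ms : List String) (x : String) : String :=
  ms.foldl (fun x m => if pyIsSubstring m x then pyStringDiff x m else x) x

def remove_double_subsents_alt (subs : List String) : List String :=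
  (subs.reverse.foldl
    (fun (st : List String × List String) x =>
      let x' := applyMods st.1 x
      (st.1 ++ [x'], st.2 ++ [PySem.Str.strip x'])) (([] : List String), ([] : List String))).2.reverse

-- ===== PRECONDITION & SPEC =====
def Spec_remove_double_subsents (subs : List String) (out : List String) : Prop := out = remove_double_subsents_alt subs
instance (subs : List String) (out : List String) : Decidable (Spec_remove_double_subsents subs out) := by unfold Spec_remove_double_subsents; infer_instance

-- ===== CLAIM (what is proved, stated in full; the proofs are below) =====
def Claim_equal_remove_double_subsents : Prop := ∀ (subs : List String), Dom_remove_double_subsents subs → Spec_remove_double_subsents subs (remove_double_subsents subs)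

-- ===== LEMMAS AND PROOFS =====

theorem loop_nil : remove_double_subsents_loop [] [] = [] := by
  rw [remove_double_subsents_loop]; simp

theorem loop_eq (S final : List String) (h : S ≠ []) :
    remove_double_subsents_loop S final
      = remove_double_subsents_loop ((S.dropLast).map (gmod (PySem.List.pyGetD S (-1) "")))
          (PySem.Str.strip (PySem.List.pyGetD S (-1) "") :: final) := by
  rw [remove_double_subsents_loop]
  rw [dif_pos (by simpa [List.length_pos_iff] using h)]
  simp [foldl_tempA, PySem.List.slice_zero_start, PySem.List.slice_to_neg_one, PySem.List.insert_zero]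

theorem loop_acc_aux : ∀ (n : Nat) (S final : List String), S.length ≤ n →
    remove_double_subsents_loop S final = remove_double_subsents_loop S [] ++ final := by
  intro n
  induction n with
  | zero =>
      intro S final h
      have : S = [] := by cases S <;> simp_all
      subst this; rw [remove_double_subsents_loop, loop_nil]; simp
  | succ n ih =>
      intro S final h
      by_cases hS : S = []
      · subst hS; rw [remove_double_subsents_loop, loop_nil]; simp
      · rw [loop_eq S final hS, loop_eq S [] hS]
        have hlen : ((S.dropLast).map (gmod (PySem.List.pyGetD S (-1) ""))).length ≤ n := by
          simp [List.length_dropLast]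
          cases S <;> simp_all
        rw [ih _ (PySem.Str.strip (PySem.List.pyGetD S (-1) "") :: final) hlen,
            ih _ [PySem.Str.strip (PySem.List.pyGetD S (-1) "")] hlen]
        simp

theorem applyMods_append (ms : List String) (l x : String) :
    applyMods (ms ++ [l]) x = gmod l (applyMods ms x) := by
  simp [applyMods, List.foldl_append, gmod]

theorem key : ∀ (r ms out : List String),
    (r.foldl (fun (st : List String × List String) x =>
        let x' := applyMods st.1 x
        (st.1 ++ [x'], st.2 ++ [PySem.Str.strip x'])) (ms, out)).2
      = out ++ (remove_double_subsents_loop (r.reverse.map (applyMods ms)) []).reverse := by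
  intro r
  induction r with
  | nil => intro ms out; simp [loop_nil]
  | cons x r ih =>
      intro ms out
      simp only [List.foldl_cons]
      rw [ih]
      have hS : (x :: r).reverse.map (applyMods ms)
          = r.reverse.map (applyMods ms) ++ [applyMods ms x] := by simp
      have hcomp : (gmod (applyMods ms x) ∘ applyMods ms) = applyMods (ms ++ [applyMods ms x]) := by
        funext y; simp [applyMods_append]
      rw [hS, loop_eq (r.reverse.map (applyMods ms) ++ [applyMods ms x]) [] (by simp),
        PySem.List.pyGetD_neg_one_append_singleton, List.dropLast_concat, List.map_map, hcomp,
        loop_acc_aux ((r.reverse.map (applyMods (ms ++ [applyMods ms x]))).length) _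
          [PySem.Str.strip (applyMods ms x)] le_rfl]
      simp

-- ===== VERDICT (by name: the statement is the Claim_ definition above) =====
theorem remove_double_subsents_spec : Claim_equal_remove_double_subsents := by
  intro subs _
  unfold Spec_remove_double_subsents remove_double_subsents remove_double_subsents_alt
  rw [key subs.reverse [] []]
  simp only [List.reverse_reverse, List.nil_append]
  have h0 : subs.map (applyMods []) = subs := by
    have : applyMods [] = id := by funext y; rfl
    rw [this, List.map_id]
  rw [h0]
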